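-- pv_equiv track=rewrite | github.com/shane0lin/alg101 | misc/geico/unique-number.py | unique_towers_greedy
-- ===== SOURCE A (Python) =====
-- def unique_towers_greedy(heights):
--     used = set()
--     result = []
--
--     for max_h in heights:
--         h = max_h
--         while h in used:
--             h -= 1
--         if h <= 0:
--             return None  # impossible
--         used.add(h)
--         result.append(h)
--
--     return result
-- ===== SOURCE B (Python) =====
-- def unique_towers_greedy(heights):
--     # Union-find "next free value": parent[v] points toward the largest
--     # free value below v; path compression jumps probes over occupied runs.
--     parent = {}
--
--     def find(h):
--         path = []
--         while h in parent:
--             path.append(h)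
--             h = parent[h]
--         for k in path:
--             parent[k] = h
--         return h
--
--     result = []
--     for max_h in heights:
--         v = find(max_h)
--         if v <= 0:
--             return None  # impossible
--         parent[v] = v - 1
--         result.append(v)
--     return result
-- ===== Notes on version B (the rewrite author's own statement) =====
-- stated objective: alternative
-- what changed: Replaced A's per-element linear decrement scan over the used-set with a union-find 'next free value' dictionary with path compression, so repeated probes into an occupied run jump to its bottom instead of rescanning it.
import Mathlib
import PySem

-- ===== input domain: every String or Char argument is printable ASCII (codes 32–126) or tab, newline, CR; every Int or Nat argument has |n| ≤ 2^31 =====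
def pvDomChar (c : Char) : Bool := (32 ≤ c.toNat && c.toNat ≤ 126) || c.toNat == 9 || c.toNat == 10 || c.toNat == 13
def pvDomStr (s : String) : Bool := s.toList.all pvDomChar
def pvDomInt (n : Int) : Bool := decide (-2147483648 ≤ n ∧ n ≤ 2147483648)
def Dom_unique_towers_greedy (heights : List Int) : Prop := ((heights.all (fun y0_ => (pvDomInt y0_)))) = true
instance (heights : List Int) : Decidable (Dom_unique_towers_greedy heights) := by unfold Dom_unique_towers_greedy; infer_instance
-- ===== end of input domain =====

-- B replaces A's per-element decrement scan by a union-find "next free value" dictionary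
-- with path compression (objective: alternative algorithm; not measured faster).

-- ===== PORT A =====
-- termination helper for the 'while h in used: h -= 1' loop (cited by probeA's decreasing_by)
theorem pv_length_filter_mono {α : Type} (p q : α → Bool)
    (himp : ∀ x, q x = true → p x = true) (l : List α) :
    (l.filter q).length ≤ (l.filter p).length := by
  induction l with
  | nil => simp
  | cons c u ihu =>
    simp only [List.filter]
    cases hqc : q c
    · cases hpc : p c <;> simp <;> omega
    · rw [himp c hqc]; simp; omega

theorem pv_length_filter_lt {α : Type} (p q : α → Bool) (a : α) (l : List α)
    (ha : a ∈ l) (hpa : p a = true) (hqa : q a = false)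
    (himp : ∀ x, q x = true → p x = true) :
    (l.filter q).length < (l.filter p).length := by
  induction l with
  | nil => cases ha
  | cons b t ih =>
    rcases List.mem_cons.mp ha with rfl | hb
    · have hle := pv_length_filter_mono p q himp t
      simp only [List.filter_cons, hpa, hqa, Bool.false_eq_true, if_true, if_false,
        List.length_cons]
      omega
    · have := ih hb
      have := pv_length_filter_mono p q himp t
      simp only [List.filter_cons]
      cases hq : q b
      · cases hp : p b <;>
          simp only [Bool.false_eq_true, if_true, if_false, List.length_cons] <;> omega
      · rw [himp b hq]
        simp only [if_true, List.length_cons]; omega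

-- while h in used: h -= 1   (literal decrement loop)
def probeA (used : List Int) (h : Int) : Int :=
  if hmem : h ∈ used then probeA used (h - 1) else h
termination_by (used.filter (fun x => decide (x ≤ h))).length
decreasing_by
  exact pv_length_filter_lt (fun x => decide (x ≤ h)) (fun x => decide (x ≤ h - 1)) h used
    hmem (by simp) (by simp) (fun x hx => by simp_all; omega)

def pvGoA (used : PySem.Set Int) (res : List Int) (hs : List Int) : Option (List Int) :=
  match hs with
  | [] => some res
  | max_h :: t =>
    let h := probeA used max_h
    if h ≤ 0 then none
    else pvGoA (PySem.Set.add used h) (res ++ [h]) t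

def unique_towers_greedy (heights : List Int) : Option (List Int) :=
  pvGoA [] [] heights

-- ===== PORT B =====
-- the 'while h in parent' loop of find, recording the path; fuel only makes it total
def pvFindLoop (parent : PySem.Dict Int Int) : Nat → Int → List Int → Option (Int × List Int)
  | 0, _, _ => none
  | fuel + 1, h, path =>
    match parent.get? h with
    | none => some (h, path)
    | some p => pvFindLoop parent fuel p (path ++ [h])

def pvGoB (parent : PySem.Dict Int Int) (res : List Int) (hs : List Int) : Option (List Int) :=
  match hs with
  | [] => some res
  | max_h :: t =>
    match pvFindLoop parent (parent.items.length + 1) max_h [] with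
    | none => none
    | some (v, path) =>
      -- for k in path: parent[k] = v   (path compression)
      let parent1 := path.foldl (fun d k => d.insert k v) parent
      if v ≤ 0 then none
      else pvGoB (parent1.insert v (v - 1)) (res ++ [v]) t

def unique_towers_greedy_alt (heights : List Int) : Option (List Int) :=
  pvGoB PySem.Dict.empty [] heights

-- ===== PRECONDITION & SPEC =====
def Spec_unique_towers_greedy (heights : List Int) (out : Option (List Int)) : Prop := out = unique_towers_greedy_alt heights
instance (heights : List Int) (out : Option (List Int)) : Decidable (Spec_unique_towers_greedy heights out) := by unfold Spec_unique_towers_greedy; infer_instance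

-- ===== CLAIM (what is proved, stated in full; the proofs are below) =====
def Claim_equal_unique_towers_greedy : Prop := ∀ (heights : List Int), Dom_unique_towers_greedy heights → Spec_unique_towers_greedy heights (unique_towers_greedy heights)

-- ===== LEMMAS AND PROOFS =====

-- parent-dict invariant: every entry points strictly down and skips only used keys
def pvINV (d : PySem.Dict Int Int) : Prop :=
  ∀ k p, d.get? k = some p → p < k ∧ ∀ j : Int, p < j → j ≤ k → d.contains j = true

theorem probe_not_mem (used : List Int) (h : Int) : probeA used h ∉ used := by
  fun_induction probeA used h with
  | case1 h hmem ih => exact ih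
  | case2 h hmem => exact hmem

theorem probe_le (used : List Int) (h : Int) : probeA used h ≤ h := by
  fun_induction probeA used h with
  | case1 h hmem ih => omega
  | case2 h hmem => omega

theorem probe_interval (used : List Int) (h : Int) :
    ∀ j : Int, probeA used h < j → j ≤ h → j ∈ used := by
  fun_induction probeA used h with
  | case1 h hmem ih =>
    intro j h1 h2
    by_cases hj : j = h
    · exact hj ▸ hmem
    · exact ih j h1 (by omega)
  | case2 h hmem => intro j h1 h2; omega

theorem probe_congr (u v : List Int) (hm : ∀ x : Int, x ∈ u ↔ x ∈ v) (h : Int) :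
    probeA u h = probeA v h := by
  fun_induction probeA u h with
  | case1 h hmem ih =>
    have hv : probeA v h = probeA v (h - 1) := by
      rw [probeA]; rw [dif_pos ((hm h).mp hmem)]
    rw [ih]; exact hv.symm
  | case2 h hmem => rw [probeA]; rw [dif_neg (fun hv => hmem ((hm h).mpr hv))]

theorem probe_skip (u : List Int) (p : Int) : ∀ h : Int, p < h →
    (∀ j : Int, p < j → j ≤ h → j ∈ u) → probeA u h = probeA u p := by
  intro h
  induction hn : (h - p).toNat generalizing h with
  | zero => intro h1; omega
  | succ n ih =>
    intro h1 hint
    rw [probeA]; rw [dif_pos (hint h h1 le_rfl)]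
    by_cases hp : h - 1 = p
    · rw [hp]
    · refine ih (h - 1) ?_ ?_ ?_ <;>
        first
        | omega
        | exact fun j a b => hint j a (by omega)

theorem find_spec (d : PySem.Dict Int Int) (hinv : pvINV d) :
    ∀ (fuel : Nat) (h : Int) (path : List Int),
      (d.items.filter (fun kv => decide (kv.1 ≤ h))).length < fuel →
      ∃ l, pvFindLoop d fuel h path = some (probeA d.keys h, path ++ l) ∧
        ∀ k ∈ l, d.contains k = true ∧ probeA d.keys k = probeA d.keys h ∧
          probeA d.keys h < k := by
  intro fuel
  induction fuel with
  | zero => intro h path hf; omega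
  | succ n ih =>
    intro h path hf
    cases hg : d.get? h with
    | none =>
      have hnk : h ∉ d.keys := (PySem.Dict.get?_eq_none_iff_not_mem_keys d h).mp hg
      refine ⟨[], ?_, by simp⟩
      have : probeA d.keys h = h := by rw [probeA]; rw [dif_neg hnk]
      simp [pvFindLoop, hg, this]
    | some p =>
      have hitem : (h, p) ∈ d.items := PySem.Dict.mem_items_of_get?_eq_some d hg
      have hmemk : h ∈ d.keys := PySem.Dict.mem_keys_of_mem_items d hitem
      obtain ⟨hplt, hintv⟩ := hinv h p hg
      have hfuel' : (d.items.filter (fun kv => decide (kv.1 ≤ p))).length < n := by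
        have := pv_length_filter_lt (fun kv => decide (kv.1 ≤ h))
          (fun kv => decide (kv.1 ≤ p)) (h, p) d.items hitem (by simp) (by simp; omega)
          (fun x hx => by simp_all; omega)
        omega
      have hskip : probeA d.keys h = probeA d.keys p :=
        probe_skip d.keys p h hplt
          (fun j a b => (PySem.Dict.contains_iff_mem_keys d j).mp (hintv j a b))
      obtain ⟨l', hl'eq, hl'b⟩ := ih p (path ++ [h]) hfuel'
      refine ⟨h :: l', ?_, ?_⟩
      · simp [pvFindLoop, hg, hl'eq, hskip]
      · intro k hk
        rcases List.mem_cons.mp hk with rfl | hk'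
        · have hple := probe_le d.keys p
          exact ⟨(PySem.Dict.contains_iff_mem_keys d _).mpr hmemk, rfl, by omega⟩
        · obtain ⟨c1, c2, c3⟩ := hl'b k hk'
          rw [hskip]
          exact ⟨c1, c2, c3⟩

theorem compress_ok (r : Int) :
    ∀ (l : List Int) (d : PySem.Dict Int Int), pvINV d →
      (∀ k ∈ l, d.contains k = true ∧ probeA d.keys k = r ∧ r < k) →
      (∀ x : Int, (l.foldl (fun d k => d.insert k r) d).contains x = d.contains x) ∧
        pvINV (l.foldl (fun d k => d.insert k r) d) := by
  intro l
  induction l with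
  | nil => exact fun d h1 _ => ⟨fun x => rfl, h1⟩
  | cons k t ih =>
    intro d hinv hb
    obtain ⟨hk, hprobe, hrk⟩ := hb k List.mem_cons_self
    have hcont : ∀ x : Int, (d.insert k r).contains x = d.contains x := by
      intro x
      rw [PySem.Dict.contains_insert]
      by_cases hx : x = k
      · subst hx; simp [hk]
      · simp [hx]
    have hkeys : ∀ x : Int, x ∈ (d.insert k r).keys ↔ x ∈ d.keys := by
      intro x
      rw [← PySem.Dict.contains_iff_mem_keys (d.insert k r) x,
        ← PySem.Dict.contains_iff_mem_keys d x, hcont x]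
    have hprobe' : ∀ x : Int, probeA (d.insert k r).keys x = probeA d.keys x :=
      probe_congr _ _ hkeys
    have hinv' : pvINV (d.insert k r) := by
      intro a b hab
      rw [PySem.Dict.get?_insert] at hab
      by_cases ha : a = k
      · rw [if_pos ha] at hab
        cases hab
        refine ⟨ha ▸ hrk, fun j h1 h2 => ?_⟩
        rw [hcont j]
        exact (PySem.Dict.contains_iff_mem_keys d j).mpr
          (probe_interval d.keys k j (by rw [hprobe]; exact h1) (ha ▸ h2))
      · rw [if_neg ha] at hab
        obtain ⟨hlt, hin⟩ := hinv a b hab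
        exact ⟨hlt, fun j h1 h2 => by rw [hcont j]; exact hin j h1 h2⟩
    have hb' : ∀ x ∈ t, (d.insert k r).contains x = true ∧
        probeA (d.insert k r).keys x = r ∧ r < x := by
      intro x hx
      obtain ⟨c1, c2, c3⟩ := hb x (List.mem_cons_of_mem _ hx)
      exact ⟨by rw [hcont x]; exact c1, by rw [hprobe' x]; exact c2, c3⟩
    obtain ⟨g1, g2⟩ := ih (d.insert k r) hinv' hb'
    exact ⟨fun x => by simp only [List.foldl]; rw [g1 x, hcont x], by simpa [List.foldl] using g2⟩

theorem go_eq : ∀ (hs used : List Int) (d : PySem.Dict Int Int) (res : List Int),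
    (∀ x : Int, x ∈ used ↔ d.contains x = true) → pvINV d →
    pvGoA used res hs = pvGoB d res hs := by
  intro hs
  induction hs with
  | nil => intro used d res _ _; rfl
  | cons m t ih =>
    intro used d res hmem hinv
    have hfuel : (d.items.filter (fun kv => decide (kv.1 ≤ m))).length < d.items.length + 1 :=
      Nat.lt_succ_of_le (List.length_filter_le _ _)
    obtain ⟨l, heq, hb⟩ := find_spec d hinv (d.items.length + 1) m [] hfuel
    have hkeys : ∀ x : Int, x ∈ used ↔ x ∈ d.keys :=
      fun x => (hmem x).trans (PySem.Dict.contains_iff_mem_keys d x)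
    have hpc : probeA used m = probeA d.keys m := probe_congr _ _ hkeys m
    have hrused : probeA d.keys m ∉ used := hpc ▸ probe_not_mem used m
    obtain ⟨hc1, hinv1⟩ := compress_ok (probeA d.keys m) l d hinv hb
    rw [pvGoA, pvGoB, heq]
    simp only [List.nil_append, hpc]
    by_cases hle : probeA d.keys m ≤ 0
    · rw [if_pos hle, if_pos hle]
    · rw [if_neg hle, if_neg hle]
      apply ih
      · intro x
        rw [PySem.Set.mem_add]
        rw [PySem.Dict.contains_insert, hc1 x]
        constructor
        · rintro (hx | rfl)
          · simp [(hmem x).mp hx]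
          · simp
        · intro hx
          rcases Bool.or_eq_true_iff.mp hx with hx | hx
          · right; exact (beq_iff_eq.mp hx)
          · left; exact (hmem x).mpr hx
      · intro a b hab
        rw [PySem.Dict.get?_insert] at hab
        by_cases ha : a = probeA d.keys m
        · rw [if_pos ha] at hab
          cases hab
          refine ⟨by omega, fun j h1 h2 => ?_⟩
          have hj : j = probeA d.keys m := by omega
          rw [PySem.Dict.contains_insert]
          simp [hj]
        · rw [if_neg ha] at hab
          obtain ⟨hlt, hin⟩ := hinv1 a b hab
          refine ⟨hlt, fun j h1 h2 => ?_⟩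
          rw [PySem.Dict.contains_insert]
          simp [hin j h1 h2]

-- ===== VERDICT (by name: the statement is the Claim_ definition above) =====
theorem unique_towers_greedy_spec : Claim_equal_unique_towers_greedy := by
  intro heights _
  unfold Spec_unique_towers_greedy unique_towers_greedy unique_towers_greedy_alt
  apply go_eq
  · intro x; simp [PySem.Dict.contains_empty]
  · intro k p hk; simp [PySem.Dict.get?_empty] at hk
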